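-- pv_equiv track=rewrite | github.com/jaeduck223/Beakjoon | python/1014(컨닝문제).py | valid_states
-- ===== SOURCE A (Python) =====
-- def valid_states(row_mask, C):
--     states = []
--     for s in range(1 << C):
--         if s & row_mask:
--             continue
--         if s & (s << 1):
--             continue
--         states.append(s)
--     return states
-- ===== SOURCE B (Python) =====
-- def valid_states(row_mask, C):
--     # Build the no-adjacent-bit masks directly, Fibonacci-style:
--     # prev  = valid masks over the first c columns (ascending),
--     # prev2 = valid masks over the first c-1 columns (ascending).
--     prev2, prev = [0], [0]
--     for c in range(C):
--         bit = 1 << c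
--         if row_mask & bit:
--             nxt = prev
--         else:
--             nxt = prev + [x + bit for x in prev2]
--         prev2, prev = prev, nxt
--     return prev
-- ===== Notes on version B (the rewrite author's own statement) =====
-- stated objective: alternative
-- what changed: Instead of scanning all 2^C bitmasks and filtering, B builds the valid masks directly by a Fibonacci-style recurrence on columns (masks over c columns = masks over c-1 columns plus, if column c-1 is allowed, masks over c-2 columns with bit c-1 added), producing the same ascending list while touching only valid masks; work is proportional to the output size rather than to 2^C.
import Mathlib
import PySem

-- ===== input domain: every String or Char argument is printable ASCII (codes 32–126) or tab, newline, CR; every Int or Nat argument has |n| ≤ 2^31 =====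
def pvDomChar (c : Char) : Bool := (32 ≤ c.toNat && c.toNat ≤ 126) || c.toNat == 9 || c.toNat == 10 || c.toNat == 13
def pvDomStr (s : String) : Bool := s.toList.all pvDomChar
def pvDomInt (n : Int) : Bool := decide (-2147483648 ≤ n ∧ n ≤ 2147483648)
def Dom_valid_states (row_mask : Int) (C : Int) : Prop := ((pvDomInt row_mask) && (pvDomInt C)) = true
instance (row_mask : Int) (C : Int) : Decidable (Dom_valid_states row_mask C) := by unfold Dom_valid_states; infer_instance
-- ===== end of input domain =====

-- B replaces A's scan-all-2^C-masks filter by a Fibonacci-style recurrence that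
-- builds only the valid masks (objective: alternative algorithm; equal return values proved below).
-- ===== PORT A =====
def valid_states (row_mask : Int) (C : Int) : List Int :=
  (PySem.List.pyRange 0 ((1 : Int) <<< C.toNat) 1).foldl
    (fun states s =>
      if PySem.Int.band s row_mask ≠ 0 then states
      else if PySem.Int.band s (s <<< (1 : Nat)) ≠ 0 then states
      else states ++ [s])
    []

-- ===== PORT B =====
def valid_states_alt (row_mask : Int) (C : Int) : List Int :=
  ((PySem.List.pyRange 0 C 1).foldl
    (fun st c =>
      let bit : Int := (1 : Int) <<< c.toNat
      let nxt := if PySem.Int.band row_mask bit ≠ 0 then st.2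
                 else st.2 ++ st.1.map (· + bit)
      (st.2, nxt))
    ([0], [0])).2

-- ===== PRECONDITION & SPEC =====
-- Pre_ excludes exactly the inputs where Python A raises: C < 0 makes `1 << C` a ValueError.
def Pre_valid_states (row_mask : Int) (C : Int) : Prop := 0 ≤ C
instance (row_mask : Int) (C : Int) : Decidable (Pre_valid_states row_mask C) := by unfold Pre_valid_states; infer_instance
def pvWitness_valid_states : Int × Int := (5, 4)
def Spec_valid_states (row_mask : Int) (C : Int) (out : List Int) : Prop := out = valid_states_alt row_mask C
instance (row_mask : Int) (C : Int) (out : List Int) : Decidable (Spec_valid_states row_mask C out) := by unfold Spec_valid_states; infer_instance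

-- ===== CLAIM (what is proved, stated in full; the proofs are below) =====
def Claim_equal_valid_states : Prop := ∀ (row_mask : Int) (C : Int), Dom_valid_states row_mask C → Pre_valid_states row_mask C → Spec_valid_states row_mask C (valid_states row_mask C)

-- ===== LEMMAS AND PROOFS =====

-- The common normal form: masks below 2^c that avoid row_mask and have no adjacent bits.
def pvGoodI (rm : Int) (s : Int) : Bool :=
  (PySem.Int.band s rm == 0) && (PySem.Int.band s (s <<< (1 : Nat)) == 0)

def pvGood (rm : Int) (n : Nat) : Bool := pvGoodI rm (n : Int)

def pvS (rm : Int) (c : Nat) : List Int :=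
  ((List.range (2 ^ c)).filter (pvGood rm)).map (fun n : Nat => (n : Int))

theorem band_zero_left (rm : Int) : PySem.Int.band 0 rm = 0 := by
  unfold PySem.Int.band
  split_ifs with h1 h2 h2 <;> simp_all

theorem nat_and_eq_zero_iff (a b : Nat) :
    a &&& b = 0 ↔ ∀ i, (a.testBit i && b.testBit i) = false := by
  constructor
  · intro h i
    rw [← Nat.testBit_land, h, Nat.zero_testBit]
  · intro h
    exact Nat.zero_of_testBit_eq_false fun i => by rw [Nat.testBit_land]; exact h i

theorem nat_and_eq_self_iff (s c : Nat) :
    s &&& c = s ↔ ∀ i, s.testBit i = true → c.testBit i = true := by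
  constructor
  · intro h i hi
    have := congrArg (fun x => Nat.testBit x i) h
    simp only [Nat.testBit_land] at this
    rcases Bool.eq_false_or_eq_true (c.testBit i) with hc | hc
    · exact hc
    · rw [hi, hc] at this; simp at this
  · intro h
    apply Nat.eq_of_testBit_eq
    intro i
    rw [Nat.testBit_land]
    rcases Bool.eq_false_or_eq_true (s.testBit i) with hs | hs
    · simp [hs, h i hs]
    · simp [hs]

-- which bits an Int mask permits (true = this bit does NOT hit rm)
def pvFree (rm : Int) (i : Nat) : Bool :=
  if 0 ≤ rm then !(rm.toNat.testBit i) else (-rm - 1).toNat.testBit i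

theorem band_nat_eq_zero_iff (s : Nat) (rm : Int) :
    PySem.Int.band (s : Int) rm = 0 ↔ ∀ i, s.testBit i = true → pvFree rm i = true := by
  unfold PySem.Int.band pvFree
  rw [if_pos (Int.natCast_nonneg s)]
  by_cases h : 0 ≤ rm
  · simp only [if_pos h]
    simp only [Int.toNat_natCast]
    rw [show ((s &&& rm.toNat : Nat) : Int) = 0 ↔ s &&& rm.toNat = 0 from by exact_mod_cast Iff.rfl]
    rw [nat_and_eq_zero_iff]
    constructor
    · intro he i hi
      have := he i
      rw [hi] at this; simpa using this
    · intro hf i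
      rcases Bool.eq_false_or_eq_true (s.testBit i) with hs | hs
      · have := hf i hs; rw [hs]; simpa using this
      · simp [hs]
  · simp only [if_neg h]
    simp only [Int.toNat_natCast]
    have hle : s &&& (-rm - 1).toNat ≤ s := Nat.and_le_left
    rw [show ((s - (s &&& (-rm - 1).toNat) : Nat) : Int) = 0 ↔ s - (s &&& (-rm - 1).toNat) = 0
        from by exact_mod_cast Iff.rfl]
    rw [show s - (s &&& (-rm - 1).toNat) = 0 ↔ s &&& (-rm - 1).toNat = s from by omega]
    exact nat_and_eq_self_iff s _

theorem testBit_two_pow_add (n x i : Nat) (hx : x < 2 ^ n) :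
    (2 ^ n + x).testBit i = (x.testBit i || decide (i = n)) := by
  rcases lt_trichotomy i n with h | h | h
  · rw [Nat.testBit_two_pow_add_gt h]
    simp [Nat.ne_of_lt h]
  · subst h
    rw [Nat.testBit_two_pow_add_eq]
    have : x.testBit i = false := Nat.testBit_eq_false_of_lt hx
    simp [this]
  · have h1 : (2 ^ n + x).testBit i = false := by
      apply Nat.testBit_eq_false_of_lt
      calc 2 ^ n + x < 2 ^ n + 2 ^ n := by omega
        _ = 2 ^ (n + 1) := by ring
        _ ≤ 2 ^ i := Nat.pow_le_pow_right (by norm_num) h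
    have h2 : x.testBit i = false := by
      apply Nat.testBit_eq_false_of_lt
      exact lt_of_lt_of_le hx (Nat.pow_le_pow_right (by norm_num) (le_of_lt h))
    simp [h1, h2, Nat.ne_of_gt h]

theorem band_split (rm : Int) (n x : Nat) (hx : x < 2 ^ n) :
    PySem.Int.band ((2 ^ n + x : Nat) : Int) rm = 0 ↔
      PySem.Int.band ((2 ^ n : Nat) : Int) rm = 0 ∧ PySem.Int.band (x : Int) rm = 0 := by
  rw [band_nat_eq_zero_iff, band_nat_eq_zero_iff, band_nat_eq_zero_iff]
  constructor
  · intro h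
    constructor
    · intro i hi
      apply h i
      rw [testBit_two_pow_add n x i hx]
      rw [Nat.testBit_two_pow] at hi
      simp at hi
      simp [hi]
    · intro i hi
      apply h i
      rw [testBit_two_pow_add n x i hx, hi]
      simp
  · rintro ⟨h1, h2⟩ i hi
    rw [testBit_two_pow_add n x i hx] at hi
    rcases Bool.or_eq_true_iff.mp hi with hx' | hn
    · exact h2 i hx'
    · have : i = n := by simpa using hn
      subst this
      exact h1 i (by rw [Nat.testBit_two_pow]; simp)

-- no two adjacent set bits, via the self-and-double test
theorem nat_adj_iff (s : Nat) :
    s &&& (s <<< 1) = 0 ↔ ∀ i, s.testBit (i + 1) = true → s.testBit i = false := by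
  rw [nat_and_eq_zero_iff]
  constructor
  · intro h i hi
    have := h (i + 1)
    rw [Nat.testBit_shiftLeft, hi] at this
    simpa using this
  · intro h i
    rw [Nat.testBit_shiftLeft]
    rcases i with _ | j
    · simp
    · rcases Bool.eq_false_or_eq_true (s.testBit (j + 1)) with hs | hs
      · have := h j hs
        simp [hs, this]
      · simp [hs]

theorem testBit_true_of_ge (k x : Nat) (h1 : 2 ^ k ≤ x) (h2 : x < 2 ^ (k + 1)) :
    x.testBit k = true := by
  rw [Nat.testBit_eq_decide_div_mod_eq]
  have hd : x / 2 ^ k = 1 := by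
    apply Nat.div_eq_of_lt_le
    · simpa using h1
    · have : 2 ^ (k + 1) = (1 + 1) * 2 ^ k := by ring
      omega
  simp [hd]

-- adjacency of 2^n + x decomposes into adjacency of x plus x < 2^(n-1)
theorem adj_split (n x : Nat) (hx : x < 2 ^ n) :
    (2 ^ n + x) &&& ((2 ^ n + x) <<< 1) = 0 ↔
      (x &&& (x <<< 1) = 0 ∧ x < 2 ^ (n - 1)) := by
  rcases Nat.eq_zero_or_pos n with hn | hn
  · subst hn
    have hx0 : x = 0 := by omega
    subst hx0
    decide
  · rw [nat_adj_iff, nat_adj_iff]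
    have hbit : ∀ i, (2 ^ n + x).testBit i = (x.testBit i || decide (i = n)) :=
      fun i => testBit_two_pow_add n x i hx
    constructor
    · intro H
      constructor
      · intro i hi
        have h1 := H i (by rw [hbit]; simp [hi])
        rw [hbit] at h1
        rcases Bool.or_eq_false_iff.mp h1 with ⟨ha, _⟩
        exact ha
      · rcases Nat.lt_or_ge x (2 ^ (n - 1)) with hlt | hge
        · exact hlt
        · exfalso
          have hxb : x.testBit (n - 1) = true := by
            apply testBit_true_of_ge
            · exact hge
            · rwa [Nat.sub_add_cancel hn]
          have h1 := H (n - 1) (by rw [hbit, Nat.sub_add_cancel hn]; simp)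
          rw [hbit, hxb] at h1
          simp at h1
    · rintro ⟨Hadj, hlt⟩ i hi
      rw [hbit] at hi
      rw [hbit]
      rcases Bool.or_eq_true_iff.mp hi with hxi | hin
      · have h1 : x.testBit i = false := Hadj i hxi
        have h2 : i ≠ n := by
          intro h
          subst h
          have hf : x.testBit (i + 1) = false :=
            Nat.testBit_eq_false_of_lt
              (lt_of_lt_of_le hx (Nat.pow_le_pow_right (by norm_num) (Nat.le_succ i)))
          rw [hf] at hxi
          cases hxi
        simp [h1, h2]
      · have hin' : i + 1 = n := by simpa using hin
        have hi1 : i = n - 1 := by omega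
        have h1 : x.testBit i = false := by
          apply Nat.testBit_eq_false_of_lt
          rw [hi1]
          exact hlt
        have h2 : i ≠ n := by omega
        simp [h1, h2]

theorem cast_shift_one (s : Nat) : ((s : Int) <<< (1 : Nat)) = ((s <<< 1 : Nat) : Int) := by
  rw [Int.shiftLeft_eq, Nat.shiftLeft_eq]
  push_cast
  ring

theorem band_cast_shift (s : Nat) :
    PySem.Int.band (s : Int) ((s : Int) <<< (1 : Nat)) = ((s &&& (s <<< 1) : Nat) : Int) := by
  rw [cast_shift_one, PySem.Int.band_natCast]

theorem pvGood_eq_true_iff (rm : Int) (s : Nat) :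
    pvGood rm s = true ↔ (PySem.Int.band (s : Int) rm = 0 ∧ s &&& (s <<< 1) = 0) := by
  unfold pvGood pvGoodI
  rw [band_cast_shift]
  simp

theorem pvGood_zero (rm : Int) : pvGood rm 0 = true := by
  rw [pvGood_eq_true_iff]
  refine ⟨by simpa using band_zero_left rm, by decide⟩

theorem pvS_zero (rm : Int) : pvS rm 0 = [0] := by
  unfold pvS
  rw [pow_zero, List.range_one]
  simp [pvGood_zero]

theorem pvGood_step (rm : Int) (n x : Nat) (hx : x < 2 ^ n) :
    pvGood rm (2 ^ n + x) =
      ((PySem.Int.band ((2 ^ n : Nat) : Int) rm == 0) && (decide (x < 2 ^ (n - 1)) && pvGood rm x)) := by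
  apply Bool.eq_iff_iff.mpr
  rw [pvGood_eq_true_iff]
  rw [band_split rm n x hx, adj_split n x hx]
  simp only [Bool.and_eq_true, beq_iff_eq, decide_eq_true_eq, pvGood_eq_true_iff]
  tauto

-- the (x < 2^(n-1)) part of the test trims range (2^n) down to range (2^(n-1))
theorem filter_half (rm : Int) (n : Nat) :
    (List.range (2 ^ n)).filter (fun x => decide (x < 2 ^ (n - 1)) && pvGood rm x) =
      (List.range (2 ^ (n - 1))).filter (pvGood rm) := by
  rcases Nat.eq_zero_or_pos n with hn | hn
  · subst hn
    apply List.filter_congr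
    intro x hx
    rw [List.mem_range] at hx
    simp only [Nat.zero_sub, pow_zero] at *
    simp [hx]
  · have h2 : 2 ^ n = 2 ^ (n - 1) + 2 ^ (n - 1) := by
      conv_lhs => rw [show n = (n - 1) + 1 from by omega]
      rw [pow_succ]
      ring
    rw [h2, List.range_add, List.filter_append]
    have hfst : (List.range (2 ^ (n - 1))).filter (fun x => decide (x < 2 ^ (n - 1)) && pvGood rm x) =
        (List.range (2 ^ (n - 1))).filter (pvGood rm) := by
      apply List.filter_congr
      intro x hx
      rw [List.mem_range] at hx
      simp [hx]
    have hsnd : ((List.range (2 ^ (n - 1))).map (fun x => 2 ^ (n - 1) + x)).filter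
        (fun x => decide (x < 2 ^ (n - 1)) && pvGood rm x) = [] := by
      rw [List.filter_map]
      rw [show (List.range (2 ^ (n - 1))).filter
            ((fun x => decide (x < 2 ^ (n - 1)) && pvGood rm x) ∘ (fun x => 2 ^ (n - 1) + x)) = [] from ?_]
      · simp
      · apply List.filter_eq_nil_iff.mpr
        intro x _
        simp
    rw [hfst, hsnd, List.append_nil]

theorem pvS_succ (rm : Int) (n : Nat) :
    pvS rm (n + 1) = pvS rm n ++
      (if PySem.Int.band rm ((2 ^ n : Nat) : Int) = 0
       then (pvS rm (n - 1)).map (· + ((2 ^ n : Nat) : Int)) else []) := by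
  unfold pvS
  have h2 : 2 ^ (n + 1) = 2 ^ n + 2 ^ n := by ring
  rw [h2, List.range_add, List.filter_append, List.map_append]
  congr 1
  rw [List.filter_map]
  have hpt : (List.range (2 ^ n)).filter ((pvGood rm) ∘ (fun x => 2 ^ n + x)) =
      (List.range (2 ^ n)).filter
        (fun x => (PySem.Int.band ((2 ^ n : Nat) : Int) rm == 0) && (decide (x < 2 ^ (n - 1)) && pvGood rm x)) := by
    apply List.filter_congr
    intro x hx
    rw [List.mem_range] at hx
    simp only [Function.comp_apply]
    rw [pvGood_step rm n x hx]
  rw [hpt]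
  by_cases hc : PySem.Int.band rm ((2 ^ n : Nat) : Int) = 0
  · have hc' : PySem.Int.band ((2 ^ n : Nat) : Int) rm = 0 := by
      rw [PySem.Int.band_comm]; exact hc
    rw [if_pos hc]
    have : (List.range (2 ^ n)).filter
        (fun x => (PySem.Int.band ((2 ^ n : Nat) : Int) rm == 0) && (decide (x < 2 ^ (n - 1)) && pvGood rm x)) =
        (List.range (2 ^ n)).filter (fun x => decide (x < 2 ^ (n - 1)) && pvGood rm x) := by
      apply List.filter_congr
      intro x _
      have hb : (PySem.Int.band ((2 ^ n : Nat) : Int) rm == 0) = true := by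
        simp only [beq_iff_eq]
        exact hc'
      rw [hb, Bool.true_and]
    rw [this, filter_half rm n, List.map_map, List.map_map]
    apply List.map_congr_left
    intro x _
    simp only [Function.comp_apply]
    push_cast
    ring
  · have hc' : ¬ PySem.Int.band ((2 ^ n : Nat) : Int) rm = 0 := by
      rw [PySem.Int.band_comm]; exact hc
    rw [if_neg hc]
    have : (List.range (2 ^ n)).filter
        (fun x => (PySem.Int.band ((2 ^ n : Nat) : Int) rm == 0) && (decide (x < 2 ^ (n - 1)) && pvGood rm x)) = [] := by
      apply List.filter_eq_nil_iff.mpr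
      intro x _
      simp only [Bool.and_eq_true, beq_iff_eq, not_and]
      intro h
      exact absurd (show PySem.Int.band ((2 ^ n : Nat) : Int) rm = 0 by exact_mod_cast h) hc'
    rw [this]
    simp

theorem valid_states_eq_pvS (rm C : Int) :
    valid_states rm C = pvS rm C.toNat := by
  unfold valid_states
  have hfun : (fun (states : List Int) (s : Int) =>
      if PySem.Int.band s rm ≠ 0 then states
      else if PySem.Int.band s (s <<< (1 : Nat)) ≠ 0 then states
      else states ++ [s]) =
      (fun (acc : List Int) (s : Int) => if pvGoodI rm s then acc ++ [s] else acc) := by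
    funext acc s
    unfold pvGoodI
    by_cases h1 : PySem.Int.band s rm = 0 <;>
      by_cases h2 : PySem.Int.band s (s <<< (1 : Nat)) = 0 <;>
        simp [h1, h2]
  rw [hfun, PySem.List.foldl_append_if_eq_filter]
  have hN : ((1 : Int) <<< C.toNat) = ((2 ^ C.toNat : Nat) : Int) := by
    rw [Int.shiftLeft_eq]
    push_cast
    ring
  rw [hN, PySem.List.pyRange_one]
  have hM : (((2 ^ C.toNat : Nat) : Int) - 0).toNat = 2 ^ C.toNat := by
    rw [Int.sub_zero, Int.toNat_natCast]
  rw [hM]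
  have hmap : (List.range (2 ^ C.toNat)).map (fun (k : Nat) => (0 : Int) + (k : Int)) =
      (List.range (2 ^ C.toNat)).map (fun (k : Nat) => (k : Int)) := by
    apply List.map_congr_left
    intro x _
    ring
  rw [hmap, List.filter_map]
  simp only [List.nil_append]
  rfl

theorem alt_loop (rm : Int) (m : Nat) :
    ((List.range m).map (fun (k : Nat) => (0 : Int) + (k : Int))).foldl
      (fun (st : List Int × List Int) (c : Int) =>
        let bit : Int := (1 : Int) <<< ((c.toNat : Nat) : Int)
        let nxt := if PySem.Int.band rm bit ≠ 0 then st.2 else st.2 ++ st.1.map (· + bit)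
        (st.2, nxt)) ([0], [0])
      = (pvS rm (m - 1), pvS rm m) := by
  induction m with
  | zero =>
    simp [pvS_zero]
  | succ n ih =>
    rw [List.range_succ, List.map_append, List.foldl_append, ih]
    simp only [List.map_cons, List.map_nil, List.foldl_cons, List.foldl_nil]
    have htn : ((0 : Int) + (n : Int)).toNat = n := by
      rw [zero_add, Int.toNat_natCast]
    rw [htn]
    have hbit : ((1 : Int) <<< ((n : Nat) : Int)) = ((2 ^ n : Nat) : Int) := by
      rw [Int.shiftLeft_eq_mul_pow]
      push_cast
      ring
    have hsub : n + 1 - 1 = n := by omega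
    rw [hsub, hbit, pvS_succ rm n]
    by_cases hc : PySem.Int.band rm ((2 ^ n : Nat) : Int) = 0
    · rw [if_neg (show ¬ PySem.Int.band rm ((2 ^ n : Nat) : Int) ≠ 0 from not_not_intro hc),
        if_pos hc]
    · rw [if_pos (show PySem.Int.band rm ((2 ^ n : Nat) : Int) ≠ 0 from hc), if_neg hc]
      simp

theorem valid_states_alt_eq_pvS (rm C : Int) :
    valid_states_alt rm C = pvS rm C.toNat := by
  unfold valid_states_alt
  rw [PySem.List.pyRange_one]
  have hM : ((C : Int) - 0).toNat = C.toNat := by simp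
  rw [hM, alt_loop rm C.toNat]

-- ===== VERDICT (by name: the statement is the Claim_ definition above) =====
theorem valid_states_spec : Claim_equal_valid_states := by
  intro rm C _ _
  unfold Spec_valid_states
  rw [valid_states_eq_pvS rm C, valid_states_alt_eq_pvS rm C]
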